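-- pv_equiv track=rewrite | github.com/pypi-data/pypi-mirror-400 | packages/prodsys/prodsys-1.0.3.tar.gz/prodsys-1.0.3/analyze_node_link_bug.py | find_borders
-- ===== SOURCE A (Python) =====
-- def find_borders(locations):
--     """Simulate find_borders function"""
--     if not locations:
--         return 0, 0, 0, 0
--
--     max_x, max_y = locations[0]
--     min_x, min_y = locations[0]
--     for loc in locations:
--         x, y = loc[0], loc[1]
--         if x > max_x:
--             max_x = x
--         if y > max_y:
--             max_y = y
--         if x < min_x:
--             min_x = x
--         if y < min_y:
--             min_y = y
--     return min_x, min_y, max_x, max_y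
-- ===== SOURCE B (Python) =====
-- def find_borders(locations):
--     """Simulate find_borders function"""
--     if not locations:
--         return 0, 0, 0, 0
--     xs = [loc[0] for loc in locations]
--     ys = [loc[1] for loc in locations]
--     return min(xs), min(ys), max(xs), max(ys)
-- ===== Notes on version B (the rewrite author's own statement) =====
-- stated objective: idiomatic
-- what changed: Replaced the fused four-accumulator loop with two column extractions and four independent built-in min/max reductions.
import Mathlib
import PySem

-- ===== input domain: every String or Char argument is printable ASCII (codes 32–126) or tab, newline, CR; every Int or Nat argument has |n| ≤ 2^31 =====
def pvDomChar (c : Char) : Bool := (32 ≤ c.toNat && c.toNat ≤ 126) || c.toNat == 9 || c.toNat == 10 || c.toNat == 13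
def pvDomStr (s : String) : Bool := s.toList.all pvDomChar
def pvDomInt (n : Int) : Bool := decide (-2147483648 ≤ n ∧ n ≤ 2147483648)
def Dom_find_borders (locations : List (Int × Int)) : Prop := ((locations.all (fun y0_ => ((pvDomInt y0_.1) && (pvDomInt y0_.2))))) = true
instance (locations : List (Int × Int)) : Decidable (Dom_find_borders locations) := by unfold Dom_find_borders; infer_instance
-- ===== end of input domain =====

-- B: the fused four-accumulator loop becomes two column extractions and four built-in min/max reductions (idiomatic; same O(n) cost).
-- ===== PORT A =====
def find_borders (locations : List (Int × Int)) : Int × Int × Int × Int :=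
  match locations with
  | [] => (0, 0, 0, 0)
  | (x0, y0) :: _ =>
    let s := locations.foldl
      (fun (st : Int × Int × Int × Int) loc =>
        let mx := st.1; let my := st.2.1; let nx := st.2.2.1; let ny := st.2.2.2
        let x := loc.1; let y := loc.2
        ((if x > mx then x else mx), (if y > my then y else my),
         (if x < nx then x else nx), (if y < ny then y else ny)))
      (x0, y0, x0, y0)
    (s.2.2.1, s.2.2.2, s.1, s.2.1)

-- ===== PORT B =====
def find_borders_alt (locations : List (Int × Int)) : Int × Int × Int × Int :=
  match locations with
  | [] => (0, 0, 0, 0)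
  | _ =>
    let xs := locations.map (fun loc => loc.1)
    let ys := locations.map (fun loc => loc.2)
    ((PySem.List.min? xs (fun v => v)).getD 0, (PySem.List.min? ys (fun v => v)).getD 0,
     (PySem.List.max? xs (fun v => v)).getD 0, (PySem.List.max? ys (fun v => v)).getD 0)

-- ===== PRECONDITION & SPEC =====
def Spec_find_borders (locations : List (Int × Int)) (out : Int × Int × Int × Int) : Prop := out = find_borders_alt locations
instance (locations : List (Int × Int)) (out : Int × Int × Int × Int) : Decidable (Spec_find_borders locations out) := by unfold Spec_find_borders; infer_instance

-- ===== CLAIM (what is proved, stated in full; the proofs are below) =====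
def Claim_equal_find_borders : Prop := ∀ (locations : List (Int × Int)), Dom_find_borders locations → Spec_find_borders locations (find_borders locations)

-- ===== LEMMAS AND PROOFS =====
-- ===== VERDICT (by name: the statement is the Claim_ definition above) =====
lemma fb_loop (t : List (Int × Int)) : ∀ (mx my nx ny : Int),
    t.foldl
      (fun (st : Int × Int × Int × Int) loc =>
        let mx := st.1; let my := st.2.1; let nx := st.2.2.1; let ny := st.2.2.2
        let x := loc.1; let y := loc.2
        ((if x > mx then x else mx), (if y > my then y else my),
         (if x < nx then x else nx), (if y < ny then y else ny)))
      (mx, my, nx, ny)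
    = ((t.map (fun p => p.1)).foldl max mx, (t.map (fun p => p.2)).foldl max my,
       (t.map (fun p => p.1)).foldl min nx, (t.map (fun p => p.2)).foldl min ny) := by
  induction t with
  | nil => intro mx my nx ny; simp
  | cons p t ih =>
    intro mx my nx ny
    simp only [List.foldl_cons, List.map_cons]
    rw [ih]
    have h1 : (if p.1 > mx then p.1 else mx) = max mx p.1 := by omega
    have h2 : (if p.2 > my then p.2 else my) = max my p.2 := by omega
    have h3 : (if p.1 < nx then p.1 else nx) = min nx p.1 := by omega
    have h4 : (if p.2 < ny then p.2 else ny) = min ny p.2 := by omega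
    rw [h1, h2, h3, h4]

-- ===== VERDICT (by name: the statement is the Claim_ definition above) =====
theorem find_borders_spec : Claim_equal_find_borders := by
  intro locations _
  unfold Spec_find_borders find_borders find_borders_alt
  match locations with
  | [] => rfl
  | (x0, y0) :: t =>
    simp only [List.foldl_cons, List.map_cons]
    rw [fb_loop]
    rw [PySem.List.min?_id_cons, PySem.List.min?_id_cons, PySem.List.max?_id_cons, PySem.List.max?_id_cons]
    simp
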